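-- pv_equiv track=rewrite | github.com/epieczko/betty | skills/risk.review/ai_engine.py | _calculate_category_risk
-- ===== SOURCE A (Python) =====
-- from typing import Dict, Any, List, Optional
--
-- def _calculate_category_risk(risks: List[Dict[str, Any]]) -> int:
--     """Calculate risk level from findings"""
--     if not risks:
--         return 0
--
--     severity_weights = {
--         'critical': 35,
--         'high': 25,
--         'medium': 15,
--         'low': 5
--     }
--
--     total = sum(severity_weights.get(r.get('severity', 'low'), 5) for r in risks)
--     return min(total, 100)
-- ===== SOURCE B (Python) =====
-- def _calculate_category_risk(risks):
--     """Calculate risk level from findings (tally severities, then weight the buckets)"""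
--     if not risks:
--         return 0
--
--     severity_weights = {
--         'critical': 35,
--         'high': 25,
--         'medium': 15,
--         'low': 5
--     }
--
--     counts = {}
--     for r in risks:
--         sev = r.get('severity', 'low')
--         counts[sev] = counts.get(sev, 0) + 1
--
--     total = sum(severity_weights.get(sev, 5) * c for sev, c in counts.items())
--     return min(total, 100)
-- ===== Notes on version B (the rewrite author's own statement) =====
-- stated objective: alternative
-- what changed: B first builds a severity->count tally dict in one pass over the findings, then computes the total by iterating the distinct severity buckets (weight * count) instead of summing a weight per finding.
import Mathlib
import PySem

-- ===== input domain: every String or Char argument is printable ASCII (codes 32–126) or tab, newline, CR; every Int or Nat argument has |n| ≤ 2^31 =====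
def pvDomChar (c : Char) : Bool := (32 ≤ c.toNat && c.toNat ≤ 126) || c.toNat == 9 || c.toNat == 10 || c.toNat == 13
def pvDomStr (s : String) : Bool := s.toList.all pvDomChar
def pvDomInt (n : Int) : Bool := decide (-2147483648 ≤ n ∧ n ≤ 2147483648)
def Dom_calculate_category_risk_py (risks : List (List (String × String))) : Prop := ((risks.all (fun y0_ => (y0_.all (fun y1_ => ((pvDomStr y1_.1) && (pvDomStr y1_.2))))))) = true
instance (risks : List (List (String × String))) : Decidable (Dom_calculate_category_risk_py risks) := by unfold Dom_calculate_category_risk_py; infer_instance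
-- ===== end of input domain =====

-- B tallies severities into a dict and weights the distinct buckets; A weighs each finding directly. Alternative decomposition, same cost.

-- ===== PORT A =====
-- severity_weights literal dict (shared by both Pythons verbatim)
def pvSeverityWeights : PySem.Dict String Int :=
  PySem.Dict.ofList [("critical", 35), ("high", 25), ("medium", 15), ("low", 5)]

-- r.get('severity', 'low') on the finding dict r
def pvSevOf (r : List (String × String)) : String :=
  (PySem.Dict.mk r).getD "severity" "low"

def calculate_category_risk_py (risks : List (List (String × String))) : Int :=
  if risks = [] then 0
  else
    let total := (risks.map (fun r => pvSeverityWeights.getD (pvSevOf r) 5)).sum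
    min total 100

-- ===== PORT B =====
def calculate_category_risk_py_alt (risks : List (List (String × String))) : Int :=
  if risks = [] then 0
  else
    let counts := risks.foldl
      (fun d r =>
        let sev := pvSevOf r
        d.insert sev (d.getD sev 0 + 1))
      PySem.Dict.empty
    let total := (counts.items.map (fun p => pvSeverityWeights.getD p.1 5 * p.2)).sum
    min total 100

-- ===== PRECONDITION & SPEC =====
def Spec_calculate_category_risk_py (risks : List (List (String × String))) (out : Int) : Prop := out = calculate_category_risk_py_alt risks
instance (risks : List (List (String × String))) (out : Int) : Decidable (Spec_calculate_category_risk_py risks out) := by unfold Spec_calculate_category_risk_py; infer_instance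

-- ===== CLAIM (what is proved, stated in full; the proofs are below) =====
def Claim_equal_calculate_category_risk_py : Prop := ∀ (risks : List (List (String × String))), Dom_calculate_category_risk_py risks → Spec_calculate_category_risk_py risks (calculate_category_risk_py risks)

-- ===== LEMMAS AND PROOFS =====

-- summing a weight over the distinct elements times their multiplicity = summing the weight over the list
theorem pv_grouped_sum (w : String → Int) (l : List String) :
    ((PySem.Set.ofList l).map (fun k => w k * (l.count k : Int))).sum = (l.map w).sum := by
  induction l with
  | nil => simp [PySem.Set.ofList_nil]
  | cons x t ih =>
    rw [PySem.Set.ofList_cons]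
    have hmapeq :
        (PySem.Set.discard (PySem.Set.ofList t) x).map (fun k => w k * ((x :: t).count k : Int))
          = (PySem.Set.discard (PySem.Set.ofList t) x).map (fun k => w k * (t.count k : Int)) := by
      apply List.map_congr_left
      intro k hk
      have hne : k ≠ x := ((PySem.Set.mem_discard _ _ _).mp hk).2
      rw [List.count_cons_of_ne (by exact fun h => hne h.symm)]
    have hperm : (PySem.Set.ofList t).Perm
        (if x ∈ t then x :: PySem.Set.discard (PySem.Set.ofList t) x
         else PySem.Set.discard (PySem.Set.ofList t) x) := by
      split_ifs with hx
      · rw [List.perm_ext_iff_of_nodup (PySem.Set.nodup_ofList t)]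
        · intro a
          constructor
          · intro ha
            by_cases hax : a = x
            · simp [hax]
            · exact List.mem_cons_of_mem _ ((PySem.Set.mem_discard _ _ _).mpr ⟨ha, hax⟩)
          · intro ha
            rcases List.mem_cons.mp ha with h | h
            · subst h; exact (PySem.Set.mem_ofList _ _).mpr hx
            · exact ((PySem.Set.mem_discard _ _ _).mp h).1
        · exact List.nodup_cons.mpr
            ⟨fun hmem => ((PySem.Set.mem_discard _ _ _).mp hmem).2 rfl,
             PySem.Set.nodup_discard _ _ (PySem.Set.nodup_ofList t)⟩
      · rw [List.perm_ext_iff_of_nodup (PySem.Set.nodup_ofList t)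
            (PySem.Set.nodup_discard _ _ (PySem.Set.nodup_ofList t))]
        intro a
        constructor
        · intro ha
          refine (PySem.Set.mem_discard _ _ _).mpr ⟨ha, ?_⟩
          rintro rfl
          exact hx ((PySem.Set.mem_ofList _ _).mp ha)
        · intro ha; exact ((PySem.Set.mem_discard _ _ _).mp ha).1
    have hsum := (hperm.map (fun k => w k * (t.count k : Int))).sum_eq
    by_cases hx : x ∈ t
    · simp only [hx, if_true, List.map_cons, List.sum_cons] at hsum
      simp only [List.map_cons, List.sum_cons, hmapeq, List.count_cons_self]
      rw [← ih, hsum]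
      push_cast
      ring
    · have hc : t.count x = 0 := List.count_eq_zero.mpr hx
      simp only [hx, if_false] at hsum
      simp only [List.map_cons, List.sum_cons, hmapeq, List.count_cons_self, hc]
      rw [← ih, ← hsum]
      push_cast
      ring

theorem pv_totals_eq (risks : List (List (String × String))) :
    ((risks.foldl
        (fun d r =>
          let sev := pvSevOf r
          d.insert sev (d.getD sev 0 + 1))
        PySem.Dict.empty).items.map (fun p => pvSeverityWeights.getD p.1 5 * p.2)).sum
      = (risks.map (fun r => pvSeverityWeights.getD (pvSevOf r) 5)).sum := by
  have hfold :
      risks.foldl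
        (fun d r =>
          let sev := pvSevOf r
          d.insert sev (d.getD sev 0 + 1))
        PySem.Dict.empty
      = PySem.Dict.counter (risks.map pvSevOf) := by
    rw [← PySem.Dict.foldl_insert_getD_add_one_eq_counter, List.foldl_map]
  rw [hfold, PySem.Dict.items_counter, List.map_map]
  have h := pv_grouped_sum (fun k => pvSeverityWeights.getD k 5) (risks.map pvSevOf)
  simp only [Function.comp_def]
  rw [h, List.map_map]
  simp only [Function.comp_def]

-- ===== VERDICT (by name: the statement is the Claim_ definition above) =====
theorem calculate_category_risk_py_spec : Claim_equal_calculate_category_risk_py := by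
  intro risks _
  unfold Spec_calculate_category_risk_py calculate_category_risk_py calculate_category_risk_py_alt
  by_cases h : risks = []
  · simp [h]
  · simp only [h, if_false]
    rw [pv_totals_eq]
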